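-- pv_equiv track=rewrite | github.com/Zerohertz/Algorithm | Programmers/연습문제/햄버거_만들기/main.py | solution
-- ===== SOURCE A (Python) =====
-- def solution(ingredient):
--     answer = 0
--     tmp = []
--     for ing in ingredient:
--         tmp.append(ing)
--         if tmp[-4:] == [1, 2, 3, 1]:
--             answer += 1
--             for _ in range(4):
--                 tmp.pop()
--     return answer
-- ===== SOURCE B (Python) =====
-- def solution(ingredient):
--     lst = list(ingredient)
--     answer = 0
--     while True:
--         for i in range(len(lst) - 3):
--             if lst[i:i+4] == [1, 2, 3, 1]:
--                 del lst[i:i+4]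
--                 answer += 1
--                 break
--         else:
--             return answer
-- ===== Notes on version B (the rewrite author's own statement) =====
-- stated objective: alternative
-- what changed: A counts in one pass with a greedy stack (append each ingredient, pop 4 whenever the stack ends with 1,2,3,1); B instead repeatedly scans the whole list for the leftmost occurrence of [1,2,3,1], deletes it and restarts, counting removals -- a rewriting/normalisation formulation whose agreement with the stack rests on leftmost-removal confluence.
import Mathlib
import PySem

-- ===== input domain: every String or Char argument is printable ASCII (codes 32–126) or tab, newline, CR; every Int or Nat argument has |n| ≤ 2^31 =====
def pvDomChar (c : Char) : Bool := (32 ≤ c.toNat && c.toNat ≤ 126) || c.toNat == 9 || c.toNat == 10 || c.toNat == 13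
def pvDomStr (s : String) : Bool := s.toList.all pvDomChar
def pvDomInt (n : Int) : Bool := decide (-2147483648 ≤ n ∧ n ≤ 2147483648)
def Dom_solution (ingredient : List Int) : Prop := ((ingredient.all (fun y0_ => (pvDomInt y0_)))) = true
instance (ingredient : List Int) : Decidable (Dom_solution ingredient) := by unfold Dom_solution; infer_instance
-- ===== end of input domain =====

-- B rewrites A's one-pass greedy stack as repeated removal of the leftmost occurrence of [1,2,3,1] (alternative decomposition, same result).

-- ===== PORT A =====
-- one loop iteration: append ing, check tmp[-4:] == [1,2,3,1], pop 4 on match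
-- (tmp.pop() is dropLast; the four pops only run when tmp ends with the 4-element pattern, so tmp is never empty there)
def solutionStep (st : Int × List Int) (ing : Int) : Int × List Int :=
  let tmp := st.2 ++ [ing]
  if PySem.List.slice tmp (some (-4)) none = ([1, 2, 3, 1] : List Int) then
    (st.1 + 1, ((((tmp.dropLast).dropLast).dropLast).dropLast))
  else
    (st.1, tmp)

def solution (ingredient : List Int) : Int :=
  (ingredient.foldl solutionStep (0, ([] : List Int))).1

-- ===== PORT B =====
-- the inner for-scan of Source B: first index i with lst[i:i+4] == [1,2,3,1]
def findPat : List Int → Option Nat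
  | a :: b :: c :: d :: rest =>
    if [a, b, c, d] = ([1, 2, 3, 1] : List Int) then some 0
    else (findPat (b :: c :: d :: rest)).map (· + 1)
  | _ => none

-- needed by altLoop's termination
theorem findPat_bound : ∀ {l : List Int} {i : Nat}, findPat l = some i → i + 4 ≤ l.length := by
  intro l
  induction l using findPat.induct with
  | case1 a b c d rest h =>
    intro i hi; simp [findPat, h] at hi; subst hi; simp
  | case2 a b c d rest h ih =>
    intro i hi
    simp only [findPat, if_neg h, Option.map_eq_some_iff] at hi
    obtain ⟨j, hj, rfl⟩ := hi
    have := ih hj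
    simp at this ⊢; omega
  | case3 l _h => intro i hi; simp [findPat] at hi

-- the outer while-loop of Source B: remove the leftmost occurrence, count, restart the scan
def altLoop (answer : Int) (lst : List Int) : Int :=
  match h : findPat lst with
  | none => answer
  | some i => altLoop (answer + 1) (lst.take i ++ lst.drop (i + 4))
termination_by lst.length
decreasing_by
  have hb := findPat_bound h
  simp [List.length_take, List.length_drop]; omega

def solution_alt (ingredient : List Int) : Int := altLoop 0 ingredient

-- ===== PRECONDITION & SPEC =====
def Spec_solution (ingredient : List Int) (out : Int) : Prop := out = solution_alt ingredient
instance (ingredient : List Int) (out : Int) : Decidable (Spec_solution ingredient out) := by unfold Spec_solution; infer_instance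

-- ===== CLAIM (what is proved, stated in full; the proofs are below) =====
def Claim_equal_solution : Prop := ∀ (ingredient : List Int), Dom_solution ingredient → Spec_solution ingredient (solution ingredient)

-- ===== LEMMAS AND PROOFS =====

-- equation lemmas for altLoop
theorem altLoop_none {lst : List Int} (h : findPat lst = none) (ans : Int) : altLoop ans lst = ans := by
  rw [altLoop]; split <;> simp_all

theorem altLoop_some {lst : List Int} {i : Nat} (h : findPat lst = some i) (ans : Int) :
    altLoop ans lst = altLoop (ans + 1) (lst.take i ++ lst.drop (i + 4)) := by
  rw [altLoop]; split <;> simp_all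

-- the matched branch fires iff the pattern is a suffix of tmp
theorem cond_iff (xs : List Int) :
    (PySem.List.slice xs (some (-4)) none = ([1, 2, 3, 1] : List Int)) ↔ ([1, 2, 3, 1] : List Int) <:+ xs := by
  rw [PySem.List.slice_from_neg_ofNat xs 4 (by omega)]
  constructor
  · intro h
    have hlen : 4 ≤ xs.length := by
      by_contra hc
      have : xs.length - 4 = 0 := by omega
      rw [this, List.drop_zero] at h
      have := congrArg List.length h
      simp at this; omega
    exact ⟨xs.take (xs.length - 4), by rw [← h]; exact (List.take_append_drop _ xs)⟩
  · rintro ⟨w, rfl⟩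
    have h4 : (w ++ [1, 2, 3, 1] : List Int).length - 4 = w.length := by simp
    rw [h4, List.drop_left]

theorem drop4_concat (u : List Int) :
    (((((u ++ [1, 2, 3, 1] : List Int)).dropLast).dropLast).dropLast).dropLast = u := by
  have h : (u ++ [1, 2, 3, 1] : List Int) = (((u ++ [1]) ++ [2]) ++ [3]) ++ [1] := by simp
  rw [h, List.dropLast_concat, List.dropLast_concat, List.dropLast_concat, List.dropLast_concat]

-- consuming a pattern-free segment just appends it to tmp
theorem consume (u : List Int) :
    ∀ (tmp : List Int) (ans : Int) (v : List Int), ¬ (([1, 2, 3, 1] : List Int) <:+: (tmp ++ u)) →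
      (u ++ v).foldl solutionStep (ans, tmp) = v.foldl solutionStep (ans, tmp ++ u) := by
  induction u with
  | nil => intro tmp ans v _; simp
  | cons x u' ih =>
    intro tmp ans v hno
    have hassoc : tmp ++ [x] ++ u' = tmp ++ x :: u' := by simp
    have hcond : ¬ (PySem.List.slice (tmp ++ [x]) (some (-4)) none = ([1, 2, 3, 1] : List Int)) := by
      rw [cond_iff]
      intro hsuf
      exact hno (hsuf.isInfix.trans ⟨[], u', by simp⟩)
    have hstep : solutionStep (ans, tmp) x = (ans, tmp ++ [x]) := by
      simp [solutionStep, hcond]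
    simp only [List.cons_append, List.foldl_cons]
    rw [hstep, ih (tmp ++ [x]) ans v (by rw [hassoc]; exact hno), hassoc]

-- the answer accumulator is additive for A's fold
theorem ans_shift (v : List Int) :
    ∀ (ans : Int) (tmp : List Int), (v.foldl solutionStep (ans, tmp)).1 = ans + (v.foldl solutionStep (0, tmp)).1 := by
  induction v with
  | nil => intro ans tmp; simp
  | cons x v' ih =>
    intro ans tmp
    simp only [List.foldl_cons]
    by_cases h : PySem.List.slice (tmp ++ [x]) (some (-4)) none = ([1, 2, 3, 1] : List Int)
    · simp only [solutionStep, h, if_pos]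
      rw [ih (ans + 1), ih (0 + 1)]; ring
    · simp only [solutionStep, h, if_neg, not_false_iff]
      rw [ih ans]

-- findPat none means the pattern occurs nowhere
theorem findPat_none : ∀ {l : List Int}, findPat l = none → ¬ (([1, 2, 3, 1] : List Int) <:+: l) := by
  intro l
  induction l using findPat.induct with
  | case1 a b c d rest h => intro hn; simp [findPat, h] at hn
  | case2 a b c d rest h ih =>
    intro hn hinf
    simp only [findPat, if_neg h, Option.map_eq_none_iff] at hn
    rcases (List.infix_cons_iff).1 hinf with hpre | hinf'
    · obtain ⟨t, ht⟩ := hpre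
      apply h
      have := congrArg (List.take 4) ht
      simpa using this.symm
    · exact ih hn hinf'
  | case3 l h =>
    intro _ hinf
    have h4 := hinf.length_le
    rcases l with _ | ⟨a, _ | ⟨b, _ | ⟨c, _ | ⟨d, rest⟩⟩⟩⟩
    · simp at h4
    · simp at h4
    · simp at h4
    · simp at h4
    · exact h a b c d rest rfl

-- findPat some i: l splits as u ++ [1,2,3,1] ++ v at the LEFTMOST occurrence
theorem findPat_some : ∀ {l : List Int} {i : Nat}, findPat l = some i →
    ∃ u v : List Int, l = u ++ ([1, 2, 3, 1] : List Int) ++ v ∧ u.length = i ∧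
      ¬ (([1, 2, 3, 1] : List Int) <:+: (u ++ [1, 2, 3])) := by
  intro l
  induction l using findPat.induct with
  | case1 a b c d rest h =>
    intro i hi
    simp only [findPat, if_pos h, Option.some.injEq] at hi
    subst hi
    obtain ⟨rfl, rfl, rfl, rfl⟩ : a = 1 ∧ b = 2 ∧ c = 3 ∧ d = 1 := by simpa using h
    exact ⟨[], rest, by simp, rfl, by decide⟩
  | case2 a b c d rest h ih =>
    intro i hi
    simp only [findPat, if_neg h, Option.map_eq_some_iff] at hi
    obtain ⟨j, hj, rfl⟩ := hi
    obtain ⟨u', v, hdec, hlen, hfirst⟩ := ih hj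
    refine ⟨a :: u', v, by simp [hdec], by simp [hlen], ?_⟩
    intro hinf
    rcases (List.infix_cons_iff).1 (by simpa using hinf) with hpre | hinf'
    · -- a prefix occurrence at index 0 would have matched [a,b,c,d]
      apply h
      have hmid : (u' ++ [1, 2, 3] : List Int) <+: (b :: c :: d :: rest) := by
        rw [hdec]; exact ⟨1 :: v, by simp⟩
      have hpre2 : ([1, 2, 3, 1] : List Int) <+: a :: b :: c :: d :: rest :=
        hpre.trans ((List.prefix_cons_inj a).mpr hmid)
      obtain ⟨t, ht⟩ := hpre2
      have := congrArg (List.take 4) ht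
      simpa using this.symm
    · exact hfirst hinf'
  | case3 l h => intro i hi; simp [findPat] at hi

-- accumulator additivity for B's loop
theorem altLoop_shift : ∀ (n : Nat) (lst : List Int), lst.length ≤ n → ∀ (ans : Int),
    altLoop ans lst = ans + altLoop 0 lst := by
  intro n
  induction n with
  | zero =>
    intro lst hl ans
    have : lst = [] := by rcases lst with _ | _ <;> simp_all
    subst this
    rw [altLoop_none (by decide), altLoop_none (by decide)]; ring
  | succ m ih =>
    intro lst hl ans
    cases hf : findPat lst with
    | none => rw [altLoop_none hf, altLoop_none hf]; ring
    | some i =>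
      have hb := findPat_bound hf
      have hlen : (lst.take i ++ lst.drop (i + 4)).length ≤ m := by
        simp [List.length_take, List.length_drop]; omega
      rw [altLoop_some hf, altLoop_some hf, ih _ hlen (ans + 1), ih _ hlen (0 + 1)]; ring

-- main equivalence of the two loops, by strong induction on length
theorem main_loop : ∀ (n : Nat) (lst : List Int), lst.length ≤ n → ∀ (ans : Int),
    (lst.foldl solutionStep (ans, ([] : List Int))).1 = altLoop ans lst := by
  intro n
  induction n with
  | zero =>
    intro lst hl ans
    have : lst = [] := by rcases lst with _ | _ <;> simp_all
    subst this
    rw [altLoop_none (by decide)]; simp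
  | succ m ih =>
    intro lst hl ans
    cases hf : findPat lst with
    | none =>
      have hno := findPat_none hf
      have hc := consume lst ([] : List Int) ans ([] : List Int) (by simpa using hno)
      simp only [List.append_nil, List.nil_append, List.foldl_nil] at hc
      rw [hc, altLoop_none hf]
    | some i =>
      obtain ⟨u, v, hdec, hulen, hfirst⟩ := findPat_some hf
      have hb := findPat_bound hf
      -- B's removal is exactly u ++ v
      have htake : lst.take i = u := by
        rw [hdec, List.append_assoc, ← hulen]; exact List.take_left
      have hdrop : lst.drop (i + 4) = v := by
        rw [hdec, List.append_assoc, ← hulen, List.drop_length_add_append]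
        simp
      -- the pattern segment, re-bracketed for the fold
      have hl2 : lst = (u ++ [1, 2, 3]) ++ (1 :: v) := by rw [hdec]; simp
      have hfree : ¬ (([1, 2, 3, 1] : List Int) <:+: (([] : List Int) ++ (u ++ [1, 2, 3]))) := by
        simpa using hfirst
      have hufree : ¬ (([1, 2, 3, 1] : List Int) <:+: (([] : List Int) ++ u)) := by
        simp only [List.nil_append]
        intro hu
        exact hfirst (hu.trans ⟨[], [1, 2, 3], by simp⟩)
      -- the step on the closing 1 fires and leaves tmp = u
      have hcond : PySem.List.slice ((u ++ [1, 2, 3]) ++ [1]) (some (-4)) none = ([1, 2, 3, 1] : List Int) := by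
        rw [cond_iff]
        exact ⟨u, by simp⟩
      have hstep : solutionStep (ans, u ++ [1, 2, 3]) 1 = (ans + 1, u) := by
        simp only [solutionStep, hcond, if_pos]
        refine Prod.ext rfl ?_
        have : (u ++ [1, 2, 3] : List Int) ++ [1] = u ++ [1, 2, 3, 1] := by simp
        simp only [this, drop4_concat]
      have hlen2 : (u ++ v).length ≤ m := by
        have := congrArg List.length hdec
        simp at this ⊢; omega
      calc (lst.foldl solutionStep (ans, ([] : List Int))).1
          = ((1 :: v).foldl solutionStep (ans, ([] : List Int) ++ (u ++ [1, 2, 3]))).1 := by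
            rw [hl2, consume _ _ _ _ hfree]
        _ = (v.foldl solutionStep (ans + 1, u)).1 := by
            simp only [List.nil_append, List.foldl_cons, hstep]
        _ = (ans + 1) + (v.foldl solutionStep (0, u)).1 := ans_shift v (ans + 1) u
        _ = (ans + 1) + ((u ++ v).foldl solutionStep (0, ([] : List Int))).1 := by
            rw [consume u ([] : List Int) 0 v hufree]; simp
        _ = (ans + 1) + altLoop 0 (u ++ v) := by rw [ih (u ++ v) hlen2 0]
        _ = altLoop (ans + 1) (u ++ v) := (altLoop_shift (u ++ v).length (u ++ v) le_rfl (ans + 1)).symm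
        _ = altLoop ans lst := by rw [altLoop_some hf, htake, hdrop]

-- ===== VERDICT (by name: the statement is the Claim_ definition above) =====
theorem solution_spec : Claim_equal_solution := by
  intro ingredient _
  unfold Spec_solution solution solution_alt
  exact main_loop ingredient.length ingredient le_rfl 0
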